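-- pv_equiv track=rewrite | github.com/wwweric12/python-algorithm-lect | 프로그래머스/3/340210. ［PCCP 기출문제］ 4번 ／ 수식 복원하기/［PCCP 기출문제］ 4번 ／ 수식 복원하기.py | calculator_value
-- ===== SOURCE A (Python) =====
-- def calculator_value(a,b,ginbub,susik):
--     a=str(a)
--     b=str(b)
--     min_length =len(a)
--     if len(a)> len(b):
--         gap = len(a)-len(b)
--         b= ("0"*gap)+b
--     elif len(a)< len(b):
--         gap = len(b)-len(a)
--         a= ("0"*gap)+a
--         min_length =len(b)
--
--     ans=""
--     if susik == "+":
--         nxt_plus=0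
--         for i in range(min_length-1,-1,-1):
--             tmp_value =int(a[i])+int(b[i])+nxt_plus
--             nxt_plus= tmp_value // ginbub
--             ans += str(tmp_value%ginbub)
--         if nxt_plus:
--             ans += str(nxt_plus)
--     else:
--         nxt_minus=0
--         for i in range(min_length-1,-1,-1):
--             tmp_value =int(a[i])-int(b[i])+nxt_minus
--             nxt_minus=0
--             if tmp_value <0 :
--                 nxt_minus = -1
--                 tmp_value+=ginbub
--             ans += str(tmp_value)
--
--     result=ans[::-1]
--     for i in range(len(ans)):
--         if result[i]== "0":
--             if i == len(ans)-1:
--                 result = "0"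
--             continue
--         else:
--             result = result[i::]
--             break
--
--
--     if result == "":
--         result = "0"
--     return result
-- ===== SOURCE B (Python) =====
-- def calculator_value(a, b, ginbub, susik):
--     sa, sb = str(a), str(b)
--     L = max(len(sa), len(sb))
--     xa = [int(c) for c in sa.rjust(L, '0')]
--     xb = [int(c) for c in sb.rjust(L, '0')]
--     if susik == "+":
--         va = 0
--         for d in xa:
--             va = va * ginbub + d
--         vb = 0
--         for d in xb:
--             vb = vb * ginbub + d
--         t = va + vb
--         digs = []
--         for _ in range(L):
--             t, r = divmod(t, ginbub)
--             digs.append(r)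
--         if t:
--             digs.append(t)
--     else:
--         digs = []
--         for p in range(L):
--             i = L - 1 - p
--             e = xa[i] - xb[i] + (-1 if xa[i + 1:] < xb[i + 1:] else 0)
--             digs.append(e + ginbub if e < 0 else e)
--     out = ''.join(map(str, digs))[::-1].lstrip('0')
--     return out or '0'
-- ===== Notes on version B (the rewrite author's own statement) =====
-- stated objective: alternative
-- what changed: B removes A's sequential carry/borrow pass entirely: addition converts both operands to an integer value (Horner) and rebuilds the base-ginbub digits by repeated divmod on that single value, and subtraction computes each column independently, deriving its borrow from a lexicographic comparison of the lower-digit slices instead of propagating a borrow state.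
import Mathlib
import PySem

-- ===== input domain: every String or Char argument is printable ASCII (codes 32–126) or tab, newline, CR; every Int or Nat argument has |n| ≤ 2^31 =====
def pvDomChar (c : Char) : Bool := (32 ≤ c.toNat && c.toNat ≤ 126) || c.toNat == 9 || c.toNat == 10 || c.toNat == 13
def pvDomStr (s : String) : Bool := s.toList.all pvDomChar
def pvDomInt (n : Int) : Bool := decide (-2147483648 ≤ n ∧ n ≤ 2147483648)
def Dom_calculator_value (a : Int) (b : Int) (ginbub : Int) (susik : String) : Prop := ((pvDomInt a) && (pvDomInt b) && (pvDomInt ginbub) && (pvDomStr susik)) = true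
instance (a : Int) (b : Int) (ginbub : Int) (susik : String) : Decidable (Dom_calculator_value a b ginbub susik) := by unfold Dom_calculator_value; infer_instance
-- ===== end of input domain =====

-- B drops A's sequential carry/borrow pass: '+' goes through the integer value (Horner) and repeated
-- divmod, '-' computes every column independently with its borrow read off a lexicographic
-- comparison of the lower-digit slices; objective: alternative algorithm, same digit-operation count.

-- ===== PORT A =====
-- int(s[i]) for one character; the defaults are unreachable under Pre_ (index in range, digit char)
def pvDigAt (s : List Char) (i : Int) : Int :=
  (PySem.Int.ofChars? [PySem.List.pyGetD s i ' ']).getD 0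

-- A's '+' loop: for i in range(min_length-1,-1,-1), building (ans, nxt_plus)
def pvPlusLoopA (sa sb : List Char) (g : Int) (is : List Int) : List Char × Int :=
  is.foldl
    (fun (st : List Char × Int) i =>
      let tmp := pvDigAt sa i + pvDigAt sb i + st.2
      (st.1 ++ PySem.Int.toChars (PySem.Int.mod tmp g), PySem.Int.floordiv tmp g))
    ([], 0)

-- A's '-' loop: building (ans, nxt_minus)
def pvMinusLoopA (sa sb : List Char) (g : Int) (is : List Int) : List Char × Int :=
  is.foldl
    (fun (st : List Char × Int) i =>
      let tmp := pvDigAt sa i - pvDigAt sb i + st.2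
      if tmp < 0 then (st.1 ++ PySem.Int.toChars (tmp + g), -1)
      else (st.1 ++ PySem.Int.toChars tmp, 0))
    ([], 0)

-- A's final stripping loop: for i in range(len(ans)) with continue/break on result
def pvStripLoop (ansLen : Nat) (i : Nat) (result : List Char) : List Char :=
  if i < ansLen then
    if PySem.List.pyGetD result (i : Int) ' ' = '0' then
      if i = ansLen - 1 then pvStripLoop ansLen (i + 1) ['0']
      else pvStripLoop ansLen (i + 1) result
    else PySem.List.slice result (some (i : Int)) none
  else result
termination_by ansLen - i

def calculator_value (a : Int) (b : Int) (ginbub : Int) (susik : String) : String :=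
  let sa0 := PySem.Int.toChars a
  let sb0 := PySem.Int.toChars b
  let p : List Char × List Char × Nat :=
    if sa0.length > sb0.length then
      (sa0, List.replicate (sa0.length - sb0.length) '0' ++ sb0, sa0.length)
    else if sa0.length < sb0.length then
      (List.replicate (sb0.length - sa0.length) '0' ++ sa0, sb0, sb0.length)
    else (sa0, sb0, sa0.length)
  let ans : List Char :=
    if susik = "+" then
      let st := pvPlusLoopA p.1 p.2.1 ginbub (PySem.List.pyRange ((p.2.2 : Int) - 1) (-1) (-1))
      if st.2 ≠ 0 then st.1 ++ PySem.Int.toChars st.2 else st.1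
    else
      (pvMinusLoopA p.1 p.2.1 ginbub (PySem.List.pyRange ((p.2.2 : Int) - 1) (-1) (-1))).1
  let result := pvStripLoop ans.length 0 ans.reverse
  if result = [] then "0" else String.ofList result

-- ===== PORT B =====
-- int(c) for one digit character; the default is unreachable under Pre_ (digit chars)
def pvIntOfDigit (c : Char) : Int := (PySem.Int.ofChars? [c]).getD 0

-- Python's 'xs < ys' on two int lists, ported by hand: elementwise from the front, the first
-- mismatching pair decides by <, a strict prefix is smaller (exact for lists of ints)
def pvLexLt : List Int → List Int → Bool
  | [], [] => false
  | [], _ :: _ => true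
  | _ :: _, [] => false
  | x :: xs, y :: ys => if x < y then true else if y < x then false else pvLexLt xs ys

-- B's '+' back-conversion loop: for _ in range(L): t, r = divmod(t, ginbub); digs.append(r)
def pvDivmodLoopB (g : Int) (n : Nat) (t0 : Int) : List Int × Int :=
  (List.range n).foldl
    (fun (st : List Int × Int) _ =>
      let qr := (PySem.Int.divmod? st.2 g).getD (0, 0)
      (st.1 ++ [qr.2], qr.1))
    ([], t0)

def calculator_value_alt (a : Int) (b : Int) (ginbub : Int) (susik : String) : String :=
  let sa := PySem.Int.toChars a
  let sb := PySem.Int.toChars b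
  let L := max sa.length sb.length
  -- sa.rjust(L, '0'): L ≥ len(sa), so it is exactly the left zero-pad
  let xa := (List.replicate (L - sa.length) '0' ++ sa).map pvIntOfDigit
  let xb := (List.replicate (L - sb.length) '0' ++ sb).map pvIntOfDigit
  let digs : List Int :=
    if susik = "+" then
      let va := xa.foldl (fun t d => t * ginbub + d) 0
      let vb := xb.foldl (fun t d => t * ginbub + d) 0
      let st := pvDivmodLoopB ginbub L (va + vb)
      if st.2 ≠ 0 then st.1 ++ [st.2] else st.1
    else
      (List.range L).map (fun p =>
        let i := L - 1 - p
        let e := PySem.List.pyGetD xa (i : Int) 0 - PySem.List.pyGetD xb (i : Int) 0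
          + (if pvLexLt (PySem.List.slice xa (some ((i : Int) + 1)) none)
                        (PySem.List.slice xb (some ((i : Int) + 1)) none) then -1 else 0)
        if e < 0 then e + ginbub else e)
  let out := ((digs.map PySem.Int.toChars).flatten).reverse.dropWhile (fun c => c = '0')
  if out = [] then "0" else String.ofList out

-- ===== PRECONDITION & SPEC =====
-- Pre_ excludes exactly the inputs where Python A raises: a negative a or b makes int('-') raise
-- ValueError, and susik == "+" with ginbub == 0 divides by zero.
def Pre_calculator_value (a : Int) (b : Int) (ginbub : Int) (susik : String) : Prop :=
  0 ≤ a ∧ 0 ≤ b ∧ (susik = "+" → ginbub ≠ 0)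
instance (a : Int) (b : Int) (ginbub : Int) (susik : String) : Decidable (Pre_calculator_value a b ginbub susik) := by unfold Pre_calculator_value; infer_instance

def pvWitness_calculator_value : Int × Int × Int × String := (12, 5, 3, "+")

def Spec_calculator_value (a : Int) (b : Int) (ginbub : Int) (susik : String) (out : String) : Prop := out = calculator_value_alt a b ginbub susik
instance (a : Int) (b : Int) (ginbub : Int) (susik : String) (out : String) : Decidable (Spec_calculator_value a b ginbub susik out) := by unfold Spec_calculator_value; infer_instance

-- ===== CLAIM (what is proved, stated in full; the proofs are below) =====
def Claim_equal_calculator_value : Prop := ∀ (a : Int) (b : Int) (ginbub : Int) (susik : String), Dom_calculator_value a b ginbub susik → Pre_calculator_value a b ginbub susik → Spec_calculator_value a b ginbub susik (calculator_value a b ginbub susik)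

-- ===== LEMMAS AND PROOFS =====

-- proof-side spine: the digit columns as int lists (A renders them to chars on the fly)
def pvSpinePlus (g : Int) (ps : List (Int × Int)) : List Int × Int :=
  ps.foldl
    (fun (st : List Int × Int) p =>
      (st.1 ++ [PySem.Int.mod (p.1 + p.2 + st.2) g], PySem.Int.floordiv (p.1 + p.2 + st.2) g))
    ([], 0)

def pvSpineMinus (g : Int) (ps : List (Int × Int)) : List Int × Int :=
  ps.foldl
    (fun (st : List Int × Int) p =>
      let v := p.1 - p.2 + st.2
      if v < 0 then (st.1 ++ [v + g], -1) else (st.1 ++ [v], 0))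
    ([], 0)

-- value of an lsb-first digit-pair column list
def pvValP (g : Int) (ps : List (Int × Int)) : Int :=
  ps.foldr (fun p acc => p.1 + p.2 + g * acc) 0

-- range(n-1, -1, -1) = [n-1, n-2, …, 0]
lemma pvRange_desc (n : Nat) :
    PySem.List.pyRange ((n : Int) - 1) (-1) (-1)
      = (List.range n).map (fun k : Nat => (n : Int) - 1 - (k : Int)) := by
  unfold PySem.List.pyRange
  simp only [if_neg (by norm_num : ¬((-1:Int) = 0)), if_neg (by norm_num : ¬((0:Int) < -1))]
  rcases Nat.eq_zero_or_pos n with h | h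
  · subst h; norm_num
  · rw [if_pos (by omega : (-1:Int) < (n : Int) - 1)]
    have : ((n : Int) - 1 - -1 + - -1 - 1) / - -1 = (n : Int) := by ring_nf; omega
    rw [this]
    simp only [Int.toNat_natCast]
    apply List.map_congr_left
    intro k _
    ring

-- the lsb-first padded digit table (both ports read the same digit values)
def pvTab (da db : List Int) (L : Nat) : List (Int × Int) :=
  (List.range L).map (fun k : Nat => (da.getD k 0, db.getD k 0))

-- reading the padded string at the descending index = reading the digit-value list at k
lemma pvDigAt_pad (c0 : List Char) (L k : Nat) (hc : c0.length ≤ L) (hk : k < L) :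
    pvDigAt (List.replicate (L - c0.length) '0' ++ c0) ((L : Int) - 1 - (k : Int))
      = (c0.reverse.map pvIntOfDigit).getD k 0 := by
  have hlen : (List.replicate (L - c0.length) '0' ++ c0).length = L := by
    simp; omega
  unfold pvDigAt pvIntOfDigit
  rw [PySem.List.pyGetD_eq_getElem _ ' ' (by omega : (0:Int) ≤ (L:Int) - 1 - k)
    (by rw [hlen]; omega)]
  have htn : ((L : Int) - 1 - (k : Int)).toNat = L - 1 - k := by omega
  rw [getElem_congr rfl htn (htn ▸ (by rw [hlen]; omega))]
  by_cases hcase : k < c0.length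
  · have h1 : (List.replicate (L - c0.length) '0' ++ c0)[L - 1 - k] =
        c0[c0.length - 1 - k]'(by omega) := by
      rw [List.getElem_append_right (by simp; omega)]
      simp only [List.length_replicate]
      congr 1
      omega
    rw [h1]
    rw [List.getD_eq_getElem _ _ (by simp; omega : k < (c0.reverse.map _).length)]
    rw [List.getElem_map, List.getElem_reverse]
  · have h1 : (List.replicate (L - c0.length) '0' ++ c0)[L - 1 - k]'(by rw [hlen]; omega) = '0' := by
      rw [List.getElem_append_left (by simp; omega)]
      simp
    rw [h1]
    rw [List.getD_eq_getElem?_getD, List.getElem?_eq_none (by simp; omega)]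
    decide

-- rendering invariant: A's char-level '+' fold is the int spine fold, rendered via toChars
lemma pvPlusFold_inv (g : Int) (ps : List (Int × Int)) :
    ∀ (acc : List Int) (c : Int),
    ps.foldl (fun (st : List Char × Int) p =>
        (st.1 ++ PySem.Int.toChars (PySem.Int.mod (p.1 + p.2 + st.2) g),
         PySem.Int.floordiv (p.1 + p.2 + st.2) g))
      ((acc.map PySem.Int.toChars).flatten, c)
    = ((((ps.foldl (fun (st : List Int × Int) p =>
          (st.1 ++ [PySem.Int.mod (p.1 + p.2 + st.2) g],
           PySem.Int.floordiv (p.1 + p.2 + st.2) g)) (acc, c))).1.map PySem.Int.toChars).flatten,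
       (ps.foldl (fun (st : List Int × Int) p =>
          (st.1 ++ [PySem.Int.mod (p.1 + p.2 + st.2) g],
           PySem.Int.floordiv (p.1 + p.2 + st.2) g)) (acc, c)).2) := by
  induction ps with
  | nil => intro acc c; rfl
  | cons p ps ih =>
      intro acc c
      simp only [List.foldl_cons]
      have hacc : (acc.map PySem.Int.toChars).flatten
            ++ PySem.Int.toChars (PySem.Int.mod (p.1 + p.2 + c) g)
          = (((acc ++ [PySem.Int.mod (p.1 + p.2 + c) g]).map PySem.Int.toChars)).flatten := by
        simp
      rw [hacc]
      exact ih _ _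

-- rendering invariant: A's char-level '-' fold is the int spine fold, rendered via toChars
lemma pvMinusFold_inv (g : Int) (ps : List (Int × Int)) :
    ∀ (acc : List Int) (c : Int),
    ps.foldl (fun (st : List Char × Int) p =>
        if p.1 - p.2 + st.2 < 0 then (st.1 ++ PySem.Int.toChars (p.1 - p.2 + st.2 + g), -1)
        else (st.1 ++ PySem.Int.toChars (p.1 - p.2 + st.2), 0))
      ((acc.map PySem.Int.toChars).flatten, c)
    = ((((ps.foldl (fun (st : List Int × Int) p =>
          if p.1 - p.2 + st.2 < 0 then (st.1 ++ [p.1 - p.2 + st.2 + g], -1)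
          else (st.1 ++ [p.1 - p.2 + st.2], 0)) (acc, c))).1.map PySem.Int.toChars).flatten,
       (ps.foldl (fun (st : List Int × Int) p =>
          if p.1 - p.2 + st.2 < 0 then (st.1 ++ [p.1 - p.2 + st.2 + g], -1)
          else (st.1 ++ [p.1 - p.2 + st.2], 0)) (acc, c)).2) := by
  induction ps with
  | nil => intro acc c; rfl
  | cons p ps ih =>
      intro acc c
      simp only [List.foldl_cons]
      by_cases hneg : p.1 - p.2 + c < 0
      · rw [if_pos hneg, if_pos hneg]
        have hacc : (acc.map PySem.Int.toChars).flatten ++ PySem.Int.toChars (p.1 - p.2 + c + g)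
            = (((acc ++ [p.1 - p.2 + c + g]).map PySem.Int.toChars)).flatten := by simp
        rw [hacc]
        exact ih _ _
      · rw [if_neg hneg, if_neg hneg]
        have hacc : (acc.map PySem.Int.toChars).flatten ++ PySem.Int.toChars (p.1 - p.2 + c)
            = (((acc ++ [p.1 - p.2 + c]).map PySem.Int.toChars)).flatten := by simp
        rw [hacc]
        exact ih _ _

-- A's '+' loop = the int spine, rendered
lemma pvPlusLoop_eq (ca cb : List Char) (g : Int) (L : Nat)
    (hL : L = max ca.length cb.length) :
    pvPlusLoopA (List.replicate (L - ca.length) '0' ++ ca)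
        (List.replicate (L - cb.length) '0' ++ cb) g
        (PySem.List.pyRange ((L : Int) - 1) (-1) (-1))
      = (let st := pvSpinePlus g (pvTab (ca.reverse.map pvIntOfDigit) (cb.reverse.map pvIntOfDigit) L)
         ((st.1.map PySem.Int.toChars).flatten, st.2)) := by
  unfold pvPlusLoopA pvSpinePlus pvTab
  rw [pvRange_desc, List.foldl_map, List.foldl_map]
  rw [PySem.List.foldl_congr_mem (List.range L) _
    (fun (st : List Char × Int) k =>
      ((st.1 ++ PySem.Int.toChars (PySem.Int.mod
          ((ca.reverse.map pvIntOfDigit).getD k 0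
            + (cb.reverse.map pvIntOfDigit).getD k 0 + st.2) g),
        PySem.Int.floordiv
          ((ca.reverse.map pvIntOfDigit).getD k 0
            + (cb.reverse.map pvIntOfDigit).getD k 0 + st.2) g)))
    ([], 0) ?_]
  · have := pvPlusFold_inv g
      ((List.range L).map (fun k : Nat =>
        ((ca.reverse.map pvIntOfDigit).getD k 0,
         (cb.reverse.map pvIntOfDigit).getD k 0))) [] 0
    simp only [List.foldl_map] at this
    exact this
  · intro acc k hk
    rw [pvDigAt_pad ca L k (by omega) (List.mem_range.mp hk),
        pvDigAt_pad cb L k (by omega) (List.mem_range.mp hk)]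

-- A's '-' loop = the int spine, rendered
lemma pvMinusLoop_eq (ca cb : List Char) (g : Int) (L : Nat)
    (hL : L = max ca.length cb.length) :
    pvMinusLoopA (List.replicate (L - ca.length) '0' ++ ca)
        (List.replicate (L - cb.length) '0' ++ cb) g
        (PySem.List.pyRange ((L : Int) - 1) (-1) (-1))
      = (let st := pvSpineMinus g (pvTab (ca.reverse.map pvIntOfDigit) (cb.reverse.map pvIntOfDigit) L)
         ((st.1.map PySem.Int.toChars).flatten, st.2)) := by
  unfold pvMinusLoopA pvSpineMinus pvTab
  rw [pvRange_desc, List.foldl_map, List.foldl_map]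
  rw [PySem.List.foldl_congr_mem (List.range L) _
    (fun (st : List Char × Int) k =>
      (if (ca.reverse.map pvIntOfDigit).getD k 0
            - (cb.reverse.map pvIntOfDigit).getD k 0 + st.2 < 0 then
        (st.1 ++ PySem.Int.toChars
          ((ca.reverse.map pvIntOfDigit).getD k 0
            - (cb.reverse.map pvIntOfDigit).getD k 0 + st.2 + g), -1)
       else
        (st.1 ++ PySem.Int.toChars
          ((ca.reverse.map pvIntOfDigit).getD k 0
            - (cb.reverse.map pvIntOfDigit).getD k 0 + st.2), 0)))
    ([], 0) ?_]
  · have := pvMinusFold_inv g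
      ((List.range L).map (fun k : Nat =>
        ((ca.reverse.map pvIntOfDigit).getD k 0,
         (cb.reverse.map pvIntOfDigit).getD k 0))) [] 0
    simp only [List.foldl_map] at this
    exact this
  · intro acc k hk
    rw [pvDigAt_pad ca L k (by omega) (List.mem_range.mp hk),
        pvDigAt_pad cb L k (by omega) (List.mem_range.mp hk)]

-- A's stripping loop = dropWhile '0' with the '0' fallback
lemma pvStripLoop_eq (t : List Char) : ∀ (i : Nat), i ≤ t.length →
    pvStripLoop t.length i t
      = if (t.drop i).dropWhile (fun c => c = '0') = []
        then (if i < t.length then ['0'] else t)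
        else (t.drop i).dropWhile (fun c => c = '0') := by
  intro i
  induction hfuel : t.length - i using Nat.strong_induction_on generalizing i with
  | _ fuel ih =>
  intro hi
  rw [pvStripLoop]
  by_cases hlt : i < t.length
  · rw [if_pos hlt]
    have hget : PySem.List.pyGetD t (i : Int) ' ' = t[i] :=
      PySem.List.pyGetD_eq_getElem t ' ' (by omega) (by exact_mod_cast hlt) |>.trans (by simp)
    have hdrop : t.drop i = t[i] :: t.drop (i + 1) := List.drop_eq_getElem_cons hlt
    by_cases hz : t[i] = '0'
    · rw [if_pos (by rw [hget]; exact hz)]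
      by_cases hlast : i = t.length - 1
      · rw [if_pos hlast]
        rw [pvStripLoop]
        rw [if_neg (by omega)]
        have : t.drop i = ['0'] := by
          rw [hdrop, hz, List.drop_eq_nil_of_le (by omega)]
        rw [this]
        simp [hlt]
      · rw [if_neg hlast]
        have hrec := ih (t.length - (i+1)) (by omega) (i+1) rfl (by omega)
        rw [hrec]
        have h2 : (t.drop i).dropWhile (fun c => c = '0') = (t.drop (i+1)).dropWhile (fun c => c = '0') := by
          rw [hdrop, List.dropWhile_cons_of_pos (by simp [hz])]
        rw [h2]
        rw [if_pos (by omega : i + 1 < t.length), if_pos hlt]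
    · rw [if_neg (by rw [hget]; exact hz)]
      rw [PySem.List.slice_from t (by omega : (0:Int) ≤ (i:Int))]
      have htn : ((i : Int)).toNat = i := by omega
      rw [htn]
      have : (t.drop i).dropWhile (fun c => c = '0') = t.drop i := by
        rw [hdrop, List.dropWhile_cons_of_neg (by simp [hz])]
      rw [this]
      rw [if_neg (show ¬ List.drop i t = [] by simp only [List.drop_eq_nil_iff]; omega)]
  · rw [if_neg hlt]
    have : i = t.length := by omega
    rw [List.drop_eq_nil_of_le (by omega)]
    simp [hlt]

lemma pvFinish_eq (ansl : List Char) :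
    (if pvStripLoop ansl.length 0 ansl.reverse = [] then "0"
     else String.ofList (pvStripLoop ansl.length 0 ansl.reverse))
      = (if ansl.reverse.dropWhile (fun c => c = '0') = [] then "0"
         else String.ofList (ansl.reverse.dropWhile (fun c => c = '0'))) := by
  have hlen : ansl.length = ansl.reverse.length := by simp
  rw [hlen]
  rw [pvStripLoop_eq ansl.reverse 0 (by omega)]
  simp only [List.drop_zero]
  by_cases hdw : ansl.reverse.dropWhile (fun c => c = '0') = []
  · rw [if_pos hdw, if_pos hdw]
    by_cases hnil : ansl.reverse = []
    · have : ¬ 0 < ansl.reverse.length := by simp [hnil]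
      rw [if_neg this, if_pos hnil]
    · have : 0 < ansl.reverse.length := List.length_pos_of_ne_nil hnil
      rw [if_pos this, if_neg (by simp)]
  · rw [if_neg hdw, if_neg hdw]

-- ========== B-side lemmas ==========

-- value of an lsb-first digit list
def pvValL (g : Int) (l : List Int) : Int :=
  l.foldr (fun d acc => d + g * acc) 0

-- Horner over the msb-first list = value of the reversed (lsb-first) list
lemma pvHorner_eq (g : Int) (m : List Int) :
    m.foldl (fun t d => t * g + d) 0 = pvValL g m.reverse := by
  induction m using List.reverseRecOn with
  | nil => rfl
  | append_singleton m d ih =>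
      rw [List.foldl_append, List.reverse_append]
      simp only [List.foldl_cons, List.foldl_nil, List.reverse_singleton, List.singleton_append]
      rw [ih]
      simp [pvValL]
      ring

-- value of the column-pair list = sum of the two column values
lemma pvValP_zip (g : Int) : ∀ (X Y : List Int), X.length = Y.length →
    pvValP g (X.zip Y) = pvValL g X + pvValL g Y := by
  intro X
  induction X with
  | nil =>
      intro Y h
      cases Y with
      | nil => simp [pvValP, pvValL]
      | cons y ys => simp at h
  | cons x xs ih =>
      intro Y h
      cases Y with
      | nil => simp at h
      | cons y ys =>
          simp only [List.zip_cons_cons]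
          simp only [pvValP, pvValL, List.foldr_cons] at *
          rw [ih ys (by simpa using h)]
          ring

-- the getD table of two padded lists is their zip
lemma pvTab_eq_zip (x y : List Int) (L : Nat) (hx : x.length ≤ L) (hy : y.length ≤ L) :
    pvTab x y L = (x ++ List.replicate (L - x.length) 0).zip (y ++ List.replicate (L - y.length) 0) := by
  have hgd : ∀ (l : List Int) (k : Nat), l.length ≤ L → k < L →
      (l ++ List.replicate (L - l.length) (0 : Int)).getD k 0 = l.getD k 0 := by
    intro l k hl hk
    by_cases hkl : k < l.length
    · rw [List.getD_eq_getElem _ _ (by simp; omega), List.getD_eq_getElem _ _ hkl,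
        List.getElem_append_left hkl]
    · rw [List.getD_eq_getElem _ _ (by simp; omega),
        List.getD_eq_getElem?_getD, List.getElem?_eq_none (by omega)]
      rw [List.getElem_append_right (by omega)]
      simp
  apply List.ext_getElem
  · simp [pvTab]; omega
  · intro k h1 h2
    have hk : k < L := by simpa [pvTab] using h1
    rw [List.getElem_zip]
    simp only [pvTab, List.getElem_map, List.getElem_range]
    rw [← hgd x k hx hk, ← hgd y k hy hk]
    rw [List.getD_eq_getElem _ _ (by simp; omega), List.getD_eq_getElem _ _ (by simp; omega)]

-- B's repeated-divmod loop on the total value replays A's column-wise carry spine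
lemma pvDivmodLoop_spine (g : Int) (hg : g ≠ 0) : ∀ (ps : List (Int × Int)) (acc : List Int) (c : Int),
    (List.range ps.length).foldl
      (fun (st : List Int × Int) _ =>
        let qr := (PySem.Int.divmod? st.2 g).getD (0, 0)
        (st.1 ++ [qr.2], qr.1)) (acc, pvValP g ps + c)
    = ps.foldl
        (fun (st : List Int × Int) p =>
          (st.1 ++ [PySem.Int.mod (p.1 + p.2 + st.2) g],
           PySem.Int.floordiv (p.1 + p.2 + st.2) g)) (acc, c) := by
  intro ps
  induction ps with
  | nil => intro acc c; simp [pvValP]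
  | cons p ps ih =>
      intro acc c
      rw [List.length_cons, List.range_succ_eq_map, List.foldl_cons, List.foldl_map]
      have hval : pvValP g (p :: ps) + c = (p.1 + p.2 + c) + g * pvValP g ps := by
        simp [pvValP]; ring
      rw [hval]
      have hqr : (PySem.Int.divmod? ((p.1 + p.2 + c) + g * pvValP g ps) g).getD (0, 0)
          = (PySem.Int.floordiv (p.1 + p.2 + c) g + pvValP g ps,
             PySem.Int.mod (p.1 + p.2 + c) g) := by
        simp only [PySem.Int.divmod?, if_neg hg, Option.getD_some, Prod.mk.injEq]
        refine ⟨?_, ?_⟩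
        · have := Int.add_mul_fdiv_left (p.1 + p.2 + c) (pvValP g ps) hg
          simpa [PySem.Int.floordiv] using this
        · simp [PySem.Int.mod]
      simp only []
      rw [hqr]
      simp only [List.foldl_cons]
      have := ih (acc ++ [PySem.Int.mod (p.1 + p.2 + c) g]) (PySem.Int.floordiv (p.1 + p.2 + c) g)
      rw [show PySem.Int.floordiv (p.1 + p.2 + c) g + pvValP g ps
            = pvValP g ps + PySem.Int.floordiv (p.1 + p.2 + c) g by ring]
      exact this

-- the '-' column value given its borrow
def pvColV (g : Int) (q : Int × Int) (c : Int) : Int :=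
  if q.1 - q.2 + c < 0 then q.1 - q.2 + c + g else q.1 - q.2 + c

-- the borrow into the next column after processing the column list ps (lsb-first)
def pvBor (ps : List (Int × Int)) : Int :=
  if pvLexLt (ps.map Prod.fst).reverse (ps.map Prod.snd).reverse then -1 else 0

lemma pvLexLt_cons (x y : Int) (xs ys : List Int) :
    pvLexLt (x :: xs) (y :: ys)
      = if x < y then true else if y < x then false else pvLexLt xs ys := rfl

-- A's sequential borrow state = the lexicographic comparison of the processed columns,
-- and its digits = the per-column closed form
lemma pvSpineMinus_closed (g : Int) (ps : List (Int × Int)) :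
    pvSpineMinus g ps
      = ((List.range ps.length).map
          (fun p => pvColV g (ps.getD p (0, 0)) (pvBor (ps.take p))), pvBor ps) := by
  induction ps using List.reverseRecOn with
  | nil => simp [pvSpineMinus, pvBor, pvLexLt]
  | append_singleton ps q ih =>
      unfold pvSpineMinus at *
      rw [List.foldl_append, ih]
      simp only [List.foldl_cons, List.foldl_nil]
      have hbor2 : pvBor (ps ++ [q]) = if q.1 - q.2 + pvBor ps < 0 then -1 else 0 := by
        unfold pvBor
        rw [List.map_append, List.map_append, List.reverse_append, List.reverse_append]
        simp only [List.map_cons, List.map_nil, List.reverse_singleton, List.singleton_append]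
        rw [pvLexLt_cons]
        by_cases hlex : pvLexLt (ps.map Prod.fst).reverse (ps.map Prod.snd).reverse
        · simp only [hlex]
          rcases lt_trichotomy q.1 q.2 with h | h | h
          · simp only [if_pos h, if_true]
            rw [if_pos (by omega)]
          · simp only [if_neg (show ¬ q.1 < q.2 by omega), if_neg (show ¬ q.2 < q.1 by omega),
              if_true]
            rw [if_pos (by omega)]
          · simp only [if_neg (show ¬ q.1 < q.2 by omega), if_pos h, Bool.false_eq_true,
              if_false]
            rw [if_neg (by omega)]
        · simp only [Bool.not_eq_true] at hlex
          simp only [hlex]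
          rcases lt_trichotomy q.1 q.2 with h | h | h
          · simp only [if_pos h, if_true]
            rw [if_pos (by omega)]
          · simp only [if_neg (show ¬ q.1 < q.2 by omega), if_neg (show ¬ q.2 < q.1 by omega),
              Bool.false_eq_true, if_false]
            rw [if_neg (by omega)]
          · simp only [if_neg (show ¬ q.1 < q.2 by omega), if_pos h, Bool.false_eq_true,
              if_false]
            rw [if_neg (by omega)]
      have hdigs : (List.range (ps ++ [q]).length).map
            (fun p => pvColV g ((ps ++ [q]).getD p (0, 0)) (pvBor ((ps ++ [q]).take p)))
          = (List.range ps.length).map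
              (fun p => pvColV g (ps.getD p (0, 0)) (pvBor (ps.take p)))
            ++ [pvColV g q (pvBor ps)] := by
        rw [List.length_append, List.length_cons, List.length_nil, List.range_succ,
          List.map_append]
        congr 1
        · apply List.map_congr_left
          intro p hp
          have hp' : p < ps.length := List.mem_range.mp hp
          rw [List.take_append_of_le_length (by omega)]
          have hgd : (ps ++ [q]).getD p (0, 0) = ps.getD p (0, 0) := by
            rw [List.getD_eq_getElem _ _ (by simp; omega), List.getD_eq_getElem _ _ hp',
              List.getElem_append_left hp']
          rw [hgd]
        · simp only [List.map_cons, List.map_nil]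
          congr 2
          · rw [List.getD_eq_getElem _ _ (by simp),
              List.getElem_append_right (by omega)]
            simp
          · rw [List.take_left]
      rw [hdigs, hbor2]
      by_cases hneg : q.1 - q.2 + pvBor ps < 0
      · rw [if_pos hneg]
        simp [pvColV, hneg]
      · rw [if_neg hneg]
        simp [pvColV, hneg]

-- B's independent per-column map = A's '-' spine digits (X, Y lsb-first, both of length L)
lemma pvMinusMap_eq (g : Int) (X Y : List Int) (L : Nat) (hX : X.length = L) (hY : Y.length = L) :
    (List.range L).map (fun p =>
        let i := L - 1 - p
        let e := PySem.List.pyGetD X.reverse (i : Int) 0 - PySem.List.pyGetD Y.reverse (i : Int) 0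
          + (if pvLexLt (PySem.List.slice X.reverse (some ((i : Int) + 1)) none)
                        (PySem.List.slice Y.reverse (some ((i : Int) + 1)) none) then -1 else 0)
        if e < 0 then e + g else e)
      = (pvSpineMinus g (X.zip Y)).1 := by
  rw [pvSpineMinus_closed]
  simp only [List.length_zip, hX, hY, Nat.min_self]
  apply List.map_congr_left
  intro p hp
  have hp' : p < L := List.mem_range.mp hp
  have hi : L - 1 - p + 1 = L - p := by omega
  have hget : ∀ (Z : List Int), Z.length = L →
      PySem.List.pyGetD Z.reverse ((L - 1 - p : Nat) : Int) 0 = Z.getD p 0 := by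
    intro Z hZ
    rw [PySem.List.pyGetD_eq_getElem _ 0 (by omega) (by simp [hZ]; omega)]
    rw [getElem_congr rfl (by omega : ((L - 1 - p : Nat) : Int).toNat = L - 1 - p)
      (by simp [hZ]; omega)]
    rw [List.getElem_reverse]
    rw [List.getD_eq_getElem _ _ (by omega)]
    congr 1
    simp [hZ]
    omega
  have hslice : ∀ (Z : List Int), Z.length = L →
      PySem.List.slice Z.reverse (some (((L - 1 - p : Nat) : Int) + 1)) none
        = (Z.take p).reverse := by
    intro Z hZ
    rw [show (((L - 1 - p : Nat) : Int) + 1) = ((L - p : Nat) : Int) by omega]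
    rw [PySem.List.slice_from _ (by omega)]
    rw [Int.toNat_natCast, List.drop_reverse]
    congr 2
    simp [hZ]
    omega
  rw [hget X hX, hget Y hY, hslice X hX, hslice Y hY]
  have htake : (X.zip Y).take p = (X.take p).zip (Y.take p) := by
    simp [List.zip, List.take_zipWith]
  have hzged : (X.zip Y).getD p (0, 0) = (X.getD p 0, Y.getD p 0) := by
    rw [List.getD_eq_getElem _ _ (by simp [hX, hY]; omega), List.getElem_zip]
    rw [List.getD_eq_getElem _ _ (by omega : p < X.length),
      List.getD_eq_getElem _ _ (by omega : p < Y.length)]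
  rw [htake, hzged]
  unfold pvColV pvBor
  rw [List.map_fst_zip (by simp [hX, hY]), List.map_snd_zip (by simp [hX, hY])]

-- one padded-shape statement covering both operator branches
lemma pvMain2 (ca cb : List Char) (g : Int) (s : String) (hg : s = "+" → g ≠ 0) (L : Nat)
    (hL : L = max ca.length cb.length) :
    (let sa := List.replicate (L - ca.length) '0' ++ ca
     let sb := List.replicate (L - cb.length) '0' ++ cb
     let ans := if s = "+" then
         (let st := pvPlusLoopA sa sb g (PySem.List.pyRange ((L : Int) - 1) (-1) (-1))
          if st.2 ≠ 0 then st.1 ++ PySem.Int.toChars st.2 else st.1)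
       else (pvMinusLoopA sa sb g (PySem.List.pyRange ((L : Int) - 1) (-1) (-1))).1
     let result := pvStripLoop ans.length 0 ans.reverse
     if result = [] then "0" else String.ofList result)
    = (let xa := (List.replicate (L - ca.length) '0' ++ ca).map pvIntOfDigit
       let xb := (List.replicate (L - cb.length) '0' ++ cb).map pvIntOfDigit
       let digs : List Int := if s = "+" then
           (let va := xa.foldl (fun t d => t * g + d) 0
            let vb := xb.foldl (fun t d => t * g + d) 0
            let st := pvDivmodLoopB g L (va + vb)
            if st.2 ≠ 0 then st.1 ++ [st.2] else st.1)
         else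
           (List.range L).map (fun p =>
             let i := L - 1 - p
             let e := PySem.List.pyGetD xa (i : Int) 0 - PySem.List.pyGetD xb (i : Int) 0
               + (if pvLexLt (PySem.List.slice xa (some ((i : Int) + 1)) none)
                             (PySem.List.slice xb (some ((i : Int) + 1)) none) then -1 else 0)
             if e < 0 then e + g else e)
       let out := ((digs.map PySem.Int.toChars).flatten).reverse.dropWhile (fun c => c = '0')
       if out = [] then "0" else String.ofList out) := by
  have hzero : pvIntOfDigit '0' = 0 := rfl
  set da := ca.reverse.map pvIntOfDigit with hda
  set db := cb.reverse.map pvIntOfDigit with hdb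
  have hdal : da.length = ca.length := by simp [hda]
  have hdbl : db.length = cb.length := by simp [hdb]
  set X := da ++ List.replicate (L - da.length) (0 : Int) with hX
  set Y := db ++ List.replicate (L - db.length) (0 : Int) with hY
  have hXl : X.length = L := by simp [hX, hdal]; omega
  have hYl : Y.length = L := by simp [hY, hdbl]; omega
  have hxa : (List.replicate (L - ca.length) '0' ++ ca).map pvIntOfDigit = X.reverse := by
    rw [hX, List.reverse_append, List.reverse_replicate, List.map_append, List.map_replicate,
      hzero, hda, List.map_reverse, List.reverse_reverse]
    simp
  have hxb : (List.replicate (L - cb.length) '0' ++ cb).map pvIntOfDigit = Y.reverse := by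
    rw [hY, List.reverse_append, List.reverse_replicate, List.map_append, List.map_replicate,
      hzero, hdb, List.map_reverse, List.reverse_reverse]
    simp
  have htab : pvTab da db L = X.zip Y :=
    pvTab_eq_zip da db L (by omega) (by omega)
  by_cases hs : s = "+"
  · -- '+' branch
    simp only [hs, if_true, hxa, hxb]
    have hA := pvPlusLoop_eq ca cb g L hL
    simp only at hA
    rw [hA]
    simp only [← hda, ← hdb]
    -- B's value and back-conversion
    have hva : X.reverse.foldl (fun t d => t * g + d) 0 = pvValL g X := by
      rw [pvHorner_eq, List.reverse_reverse]
    have hvb : Y.reverse.foldl (fun t d => t * g + d) 0 = pvValL g Y := by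
      rw [pvHorner_eq, List.reverse_reverse]
    have hval : pvValL g X + pvValL g Y = pvValP g (pvTab da db L) := by
      rw [htab, pvValP_zip g X Y (by omega)]
    have hBloop : pvDivmodLoopB g L (pvValP g (pvTab da db L))
        = pvSpinePlus g (pvTab da db L) := by
      unfold pvDivmodLoopB pvSpinePlus
      have hlen : (pvTab da db L).length = L := by simp [pvTab]
      have h0 := pvDivmodLoop_spine g (hg hs) (pvTab da db L) [] 0
      rw [hlen, show pvValP g (pvTab da db L) + 0 = pvValP g (pvTab da db L) by ring] at h0
      exact h0
    rw [hva, hvb, hval, hBloop]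
    by_cases hc : (pvSpinePlus g (pvTab da db L)).2 ≠ 0
    · simp only [if_pos hc]
      have hfl : ((pvSpinePlus g (pvTab da db L)).1.map PySem.Int.toChars).flatten
            ++ PySem.Int.toChars (pvSpinePlus g (pvTab da db L)).2
          = (((pvSpinePlus g (pvTab da db L)).1 ++ [(pvSpinePlus g (pvTab da db L)).2]).map
              PySem.Int.toChars).flatten := by
        simp
      rw [hfl]
      exact pvFinish_eq _
    · simp only [if_neg hc]
      exact pvFinish_eq _
  · -- '-' branch
    simp only [if_neg hs, hxa, hxb]
    have hA := pvMinusLoop_eq ca cb g L hL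
    simp only at hA
    rw [hA]
    simp only [← hda, ← hdb]
    have hB := pvMinusMap_eq g X Y L hXl hYl
    simp only at hB
    rw [hB, ← htab]
    exact pvFinish_eq _

-- ===== VERDICT (by name: the statement is the Claim_ definition above) =====
theorem calculator_value_spec : Claim_equal_calculator_value := by
  intro a b g s _hdom hpre
  show calculator_value a b g s = calculator_value_alt a b g s
  unfold calculator_value calculator_value_alt
  simp only [gt_iff_lt]
  rcases lt_trichotomy (PySem.Int.toChars a).length (PySem.Int.toChars b).length with h | h | h
  · rw [if_neg (show ¬ (PySem.Int.toChars b).length < (PySem.Int.toChars a).length by omega),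
      if_pos h]
    have := pvMain2 (PySem.Int.toChars a) (PySem.Int.toChars b) g s hpre.2.2
      (PySem.Int.toChars b).length (by omega)
    simpa [show (PySem.Int.toChars b).length - (PySem.Int.toChars b).length = 0 from by omega,
      show max (PySem.Int.toChars a).length (PySem.Int.toChars b).length
        = (PySem.Int.toChars b).length from by omega] using this
  · rw [if_neg (show ¬ (PySem.Int.toChars b).length < (PySem.Int.toChars a).length by omega),
      if_neg (show ¬ (PySem.Int.toChars a).length < (PySem.Int.toChars b).length by omega)]
    have := pvMain2 (PySem.Int.toChars a) (PySem.Int.toChars b) g s hpre.2.2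
      (PySem.Int.toChars a).length (by omega)
    simpa [show (PySem.Int.toChars a).length - (PySem.Int.toChars a).length = 0 from by omega,
      show max (PySem.Int.toChars a).length (PySem.Int.toChars b).length
        = (PySem.Int.toChars a).length from by omega, h] using this
  · rw [if_pos h]
    have := pvMain2 (PySem.Int.toChars a) (PySem.Int.toChars b) g s hpre.2.2
      (PySem.Int.toChars a).length (by omega)
    simpa [show (PySem.Int.toChars a).length - (PySem.Int.toChars a).length = 0 from by omega,
      show max (PySem.Int.toChars a).length (PySem.Int.toChars b).length
        = (PySem.Int.toChars a).length from by omega] using this
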